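-- pv_equiv track=rewrite | github.com/0langa/DevDocsDownloader | doc_ingest/validator.py | _has_malformed_table
-- ===== SOURCE A (Python) =====
-- def _has_malformed_table(text: str) -> bool:
--     rows: list[str] = []
--     for line in text.splitlines() + [""]:
--         if "|" in line and not line.lstrip().startswith(">"):
--             rows.append(line)
--             continue
--         if len(rows) >= 2 and _table_rows_inconsistent(rows):
--             return True
--         rows = []
--     return False
--
-- def _table_rows_inconsistent(rows: list[str]) -> bool:
--     counts = [row.count("|") for row in rows if row.strip()]
--     if len(set(counts)) <= 1:
--         return False
--     return any("---" in row for row in rows)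
-- ===== SOURCE B (Python) =====
-- def _is_table_line(line):
--     return "|" in line and not line.lstrip().startswith(">")
--
--
-- def _table_rows_inconsistent(rows):
--     counts = {row.count("|") for row in rows if row.strip()}
--     return len(counts) > 1 and any("---" in row for row in rows)
--
--
-- def _split_run(lines):
--     run = []
--     while lines and _is_table_line(lines[0]):
--         run.append(lines[0])
--         lines = lines[1:]
--     return run, lines
--
--
-- def _has_malformed_table(text):
--     blocks = []
--     lines = text.splitlines()
--     while lines:
--         if _is_table_line(lines[0]):
--             run, lines = _split_run(lines)
--             blocks.append(run)
--         else:
--             lines = lines[1:]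
--     return any(len(b) >= 2 and _table_rows_inconsistent(b) for b in blocks)
-- ===== Notes on version B (the rewrite author's own statement) =====
-- stated objective: simpler
-- what changed: Replaced A's single-pass accumulator with trailing-sentinel and early return by a two-phase decomposition: first split the lines into maximal runs of table lines (blocks), then return any(block of >=2 rows is inconsistent); the inconsistency helper becomes a single boolean expression over a set comprehension.
import Mathlib
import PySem

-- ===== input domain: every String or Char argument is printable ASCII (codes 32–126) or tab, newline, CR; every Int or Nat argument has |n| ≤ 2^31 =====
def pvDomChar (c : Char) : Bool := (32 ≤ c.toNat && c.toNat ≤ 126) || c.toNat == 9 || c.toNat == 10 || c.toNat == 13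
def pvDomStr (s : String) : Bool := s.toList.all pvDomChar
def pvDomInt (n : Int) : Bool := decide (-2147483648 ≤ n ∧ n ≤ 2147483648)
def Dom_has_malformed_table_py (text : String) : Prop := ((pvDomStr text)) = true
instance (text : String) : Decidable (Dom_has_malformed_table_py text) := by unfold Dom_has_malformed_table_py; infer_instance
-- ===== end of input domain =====

-- B replaces A's accumulator-with-sentinel single pass by a two-phase "split into table blocks, then check each" decomposition (objective: simpler).

-- ===== PORT A =====
def a_table_rows_inconsistent (rows : List String) : Bool :=
  let counts := (rows.filter (fun row => PySem.Str.len (PySem.Str.strip row) != 0)).map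
    (fun row => PySem.Str.count row "|")
  if (PySem.Set.ofList counts).length ≤ 1 then false
  else rows.any (fun row => PySem.Str.isIn "---" row)

def aLoop : List String → List String → Bool
  | [], _ => false
  | line :: rest, rows =>
    if PySem.Str.isIn "|" line && !(PySem.Str.startswith (PySem.Str.lstrip line) ">") then
      aLoop rest (rows ++ [line])
    else if decide (2 ≤ rows.length) && a_table_rows_inconsistent rows then true
    else aLoop rest []

def has_malformed_table_py (text : String) : Bool :=
  aLoop (PySem.Str.splitlines text ++ [""]) []

-- ===== PORT B =====
def bIsTableLine (line : String) : Bool :=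
  PySem.Str.isIn "|" line && !(PySem.Str.startswith (PySem.Str.lstrip line) ">")

def b_table_rows_inconsistent (rows : List String) : Bool :=
  let counts := PySem.Set.ofList ((rows.filter (fun row => PySem.Str.len (PySem.Str.strip row) != 0)).map
    (fun row => PySem.Str.count row "|"))
  decide (1 < counts.length) && rows.any (fun row => PySem.Str.isIn "---" row)

def bSplitRun : List String → List String × List String
  | [] => ([], [])
  | l :: rest =>
    if bIsTableLine l then
      let p := bSplitRun rest
      (l :: p.1, p.2)
    else ([], l :: rest)

-- cited by bBlocks' decreasing_by
theorem bSplitRun_snd_length_le : ∀ xs : List String, (bSplitRun xs).2.length ≤ xs.length := by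
  intro xs
  induction xs with
  | nil => simp [bSplitRun]
  | cons l rest ih =>
    by_cases h : bIsTableLine l
    · simp only [bSplitRun, h, if_true]
      exact Nat.le_succ_of_le ih
    · simp [bSplitRun, h]

def bBlocks : List String → List (List String)
  | [] => []
  | l :: rest =>
    if h : bIsTableLine l then
      (bSplitRun (l :: rest)).1 :: bBlocks (bSplitRun (l :: rest)).2
    else bBlocks rest
termination_by xs => xs.length
decreasing_by
  · simp only [bSplitRun, h, if_true]
    exact Nat.lt_succ_of_le (bSplitRun_snd_length_le rest)
  · simp

def has_malformed_table_py_alt (text : String) : Bool :=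
  (bBlocks (PySem.Str.splitlines text)).any
    (fun b => decide (2 ≤ b.length) && b_table_rows_inconsistent b)

-- ===== PRECONDITION & SPEC =====
def Spec_has_malformed_table_py (text : String) (out : Bool) : Prop := out = has_malformed_table_py_alt text
instance (text : String) (out : Bool) : Decidable (Spec_has_malformed_table_py text out) := by unfold Spec_has_malformed_table_py; infer_instance

-- ===== CLAIM (what is proved, stated in full; the proofs are below) =====
def Claim_equal_has_malformed_table_py : Prop := ∀ (text : String), Dom_has_malformed_table_py text → Spec_has_malformed_table_py text (has_malformed_table_py text)

-- ===== LEMMAS AND PROOFS =====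

def bCheck (b : List String) : Bool := decide (2 ≤ b.length) && b_table_rows_inconsistent b

theorem pv_ite_le_one (n : Nat) (X : Bool) :
    (if n ≤ 1 then false else X) = (decide (1 < n) && X) := by
  by_cases h : n ≤ 1
  · simp [h, Nat.not_lt.mpr h]
  · simp [h, Nat.lt_of_not_le h]

theorem inc_eq (rows : List String) :
    a_table_rows_inconsistent rows = b_table_rows_inconsistent rows := by
  unfold a_table_rows_inconsistent b_table_rows_inconsistent
  exact pv_ite_le_one _ _

theorem bCheck_nil : bCheck [] = false := by decide

theorem blocks_any_eq (t : List String) :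
    (bBlocks t).any bCheck
      = (bCheck (bSplitRun t).1 || (bBlocks (bSplitRun t).2).any bCheck) := by
  cases t with
  | nil => simp [bBlocks, bSplitRun, bCheck_nil]
  | cons l rest =>
    by_cases h : bIsTableLine l
    · simp [bBlocks, h]
    · simp [bBlocks, bSplitRun, h, bCheck_nil]

theorem aLoop_eq (ls : List String) :
    ∀ rows, aLoop (ls ++ [""]) rows
      = (bCheck (rows ++ (bSplitRun ls).1) || (bBlocks (bSplitRun ls).2).any bCheck) := by
  induction ls with
  | nil =>
    intro rows
    have h0 : bIsTableLine "" = false := by decide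
    simp only [List.nil_append, aLoop, bSplitRun, bBlocks, List.append_nil, List.any_nil,
      Bool.or_false]
    have : (PySem.Str.isIn "|" "" && !PySem.Str.startswith (PySem.Str.lstrip "") ">") = false := by
      decide
    rw [this]
    simp only [Bool.false_eq_true, if_false, bCheck, inc_eq]
    split <;> simp_all
  | cons l t ih =>
    intro rows
    by_cases h : bIsTableLine l
    · have h' : (PySem.Str.isIn "|" l && !PySem.Str.startswith (PySem.Str.lstrip l) ">") = true := h
      simp only [List.cons_append, aLoop, h', if_true, ih (rows ++ [l]), bSplitRun, h]
      simp
    · have h' : (PySem.Str.isIn "|" l && !PySem.Str.startswith (PySem.Str.lstrip l) ">") = false := by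
        simpa [bIsTableLine] using h
      have hc : (decide (2 ≤ rows.length) && a_table_rows_inconsistent rows) = bCheck rows := by
        simp [bCheck, inc_eq]
      have e2 : bSplitRun (l :: t) = (([] : List String), l :: t) := by
        simp [bSplitRun, h]
      have e3 : bBlocks (l :: t) = bBlocks t := by
        simp [bBlocks, h]
      simp only [List.cons_append, aLoop, h', Bool.false_eq_true, if_false]
      rw [ih [], List.nil_append, ← blocks_any_eq t, e2]
      simp only [List.append_nil, ← e3]
      rw [hc]
      cases bCheck rows <;> simp only [if_true, if_false, Bool.true_or, Bool.false_or,
        Bool.false_eq_true]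

-- ===== VERDICT (by name: the statement is the Claim_ definition above) =====
theorem has_malformed_table_py_spec : Claim_equal_has_malformed_table_py := by
  intro text _
  unfold Spec_has_malformed_table_py has_malformed_table_py has_malformed_table_py_alt
  rw [aLoop_eq]
  rw [List.nil_append, ← blocks_any_eq]
  rfl
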